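-- pv_equiv track=rewrite | github.com/akhilsbehl/boggle-scrabble | src/boggle-asb-ordered-counter.py | boardContainsWordP
-- ===== SOURCE A (Python) =====
-- def boardContainsWordP(board, word):
--     board = list(board)
--     for char in word:
--         try:
--             board.remove(char)
--         except ValueError:
--             return False
--     return True
-- ===== SOURCE B (Python) =====
-- from collections import Counter
--
-- def boardContainsWordP(board, word):
--     return Counter(word) <= Counter(board)
-- ===== Notes on version B (the rewrite author's own statement) =====
-- stated objective: faster
-- what changed: Replaces the per-character scan-and-remove loop (each list.remove scans the board) with frequency tables (Counter) of word and board and one bulk multiset-subset comparison <=.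
import Mathlib
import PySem

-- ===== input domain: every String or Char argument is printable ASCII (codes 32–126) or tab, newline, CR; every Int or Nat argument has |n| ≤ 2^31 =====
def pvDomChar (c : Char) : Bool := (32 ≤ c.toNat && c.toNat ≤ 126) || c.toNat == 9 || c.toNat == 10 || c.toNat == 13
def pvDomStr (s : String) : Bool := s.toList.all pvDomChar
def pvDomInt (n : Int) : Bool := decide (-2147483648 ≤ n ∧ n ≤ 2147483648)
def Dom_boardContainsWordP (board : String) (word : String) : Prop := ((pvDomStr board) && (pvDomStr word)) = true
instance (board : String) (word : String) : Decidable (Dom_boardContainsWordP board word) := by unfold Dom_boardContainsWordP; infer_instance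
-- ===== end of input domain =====

-- B replaces A's per-character scan-and-remove loop with frequency tables
-- (Counter) of word and board compared by one multiset-subset test (faster: asymptotic, measured).


-- ===== PORT A =====
-- the 'for char in word' loop with board.remove(char) / early return False
def pvGoA (b : List Char) (w : List Char) : Bool :=
  match w with
  | [] => true
  | c :: w' =>
    match PySem.List.remove? b c with
    | none => false
    | some b' => pvGoA b' w'

def boardContainsWordP (board : String) (word : String) : Bool :=
  pvGoA board.toList word.toList

-- ===== PORT B =====
-- Counter(word) <= Counter(board): every (key, count) of the word counter is covered by the board counter
def boardContainsWordP_alt (board : String) (word : String) : Bool :=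
  (PySem.Dict.counter word.toList).items.all
    (fun p => p.2 ≤ (PySem.Dict.counter board.toList).getD p.1 0)

-- ===== PRECONDITION & SPEC =====
def Spec_boardContainsWordP (board : String) (word : String) (out : Bool) : Prop := out = boardContainsWordP_alt board word
instance (board : String) (word : String) (out : Bool) : Decidable (Spec_boardContainsWordP board word out) := by unfold Spec_boardContainsWordP; infer_instance

-- ===== CLAIM (what is proved, stated in full; the proofs are below) =====
def Claim_equal_boardContainsWordP : Prop := ∀ (board : String) (word : String), Dom_boardContainsWordP board word → Spec_boardContainsWordP board word (boardContainsWordP board word)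

-- ===== LEMMAS AND PROOFS =====

-- removing one copy of c from the board matches pulling c off the word, multiset-wise
lemma pvRemove_iff (c : Char) (w' b : List Char) (hc : c ∈ b) :
    (∀ d ∈ w', w'.count d ≤ (b.erase c).count d)
      ↔ (∀ d ∈ c :: w', (c :: w').count d ≤ b.count d) := by
  have hb1 : 0 < b.count c := List.count_pos_iff.mpr hc
  constructor
  · intro h d _
    have h' : List.count d w' ≤ List.count d (b.erase c) := by
      by_cases hd : d ∈ w'
      · exact h d hd
      · simp [List.count_eq_zero_of_not_mem hd]
    rw [List.count_erase] at h'
    rw [List.count_cons]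
    by_cases hcd : c = d
    · subst hcd
      simp only [beq_self_eq_true, if_true] at h' ⊢
      omega
    · simp only [beq_iff_eq, hcd, if_false] at h' ⊢
      omega
  · intro h d _
    have h' : List.count d (c :: w') ≤ List.count d b := by
      by_cases hd : d ∈ c :: w'
      · exact h d hd
      · simp [List.count_eq_zero_of_not_mem hd]
    rw [List.count_cons] at h'
    rw [List.count_erase]
    by_cases hcd : c = d
    · subst hcd
      simp only [beq_self_eq_true, if_true] at h' ⊢
      omega
    · simp only [beq_iff_eq, hcd, if_false] at h' ⊢
      omega

-- A's loop succeeds iff the word's character multiset is contained in the board's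
lemma pvGoA_eq (w b : List Char) :
    pvGoA b w = decide (∀ c ∈ w, w.count c ≤ b.count c) := by
  induction w generalizing b with
  | nil => simp [pvGoA]
  | cons c w' ih =>
    by_cases hc : c ∈ b
    · rw [pvGoA, PySem.List.remove?_eq_some_erase b c hc]
      show pvGoA (b.erase c) w' = _
      rw [ih]
      simp only [decide_eq_decide]
      exact pvRemove_iff c w' b hc
    · rw [pvGoA, (PySem.List.remove?_eq_none_iff b c).mpr hc]
      show false = _
      have hnot : ¬ ∀ d ∈ c :: w', (c :: w').count d ≤ b.count d := by
        intro h
        have := h c (by simp)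
        rw [List.count_cons_self, List.count_eq_zero_of_not_mem hc] at this
        omega
      exact (decide_eq_false hnot).symm

-- B's bulk comparison computes the same multiset-containment test
lemma alt_eq (board word : String) :
    boardContainsWordP_alt board word
      = decide (∀ c ∈ word.toList, word.toList.count c ≤ board.toList.count c) := by
  unfold boardContainsWordP_alt
  rw [PySem.Dict.items_counter, Bool.eq_iff_iff]
  simp only [List.all_map, List.all_eq_true, Function.comp_apply,
    PySem.Dict.getD_counter, PySem.Set.mem_ofList, decide_eq_true_eq]
  constructor
  · intro h c hc
    exact_mod_cast h c hc
  · intro h k hk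
    exact_mod_cast h k hk

-- ===== VERDICT (by name: the statement is the Claim_ definition above) =====
theorem boardContainsWordP_spec : Claim_equal_boardContainsWordP := by
  intro board word _
  unfold Spec_boardContainsWordP boardContainsWordP
  rw [pvGoA_eq, alt_eq]
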